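-- pv_equiv track=rewrite | github.com/weaveeducation/edx-platform | common/djangoapps/credo_modules/event_parser.py | pull_value_from_student_properties
-- ===== SOURCE A (Python) =====
-- def pull_value_from_student_properties(key, properties):
--     key_updated = key.strip().lower()
--     new_value = None
--     new_properties = properties.copy()
--
--     tmp_properties = {}
--     for k in new_properties:
--         tmp_properties[k.strip().lower()] = k
--     for tk, tv in tmp_properties.items():
--         if tk == key_updated:
--             new_value = new_properties[tv].replace('+', '-') \
--                     .replace("\n", "").replace("\t", "").replace("\r", "")
--             del new_properties[tv]
--     return new_value, new_properties
-- ===== SOURCE B (Python) =====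
-- def pull_value_from_student_properties(key, properties):
--     key_updated = key.strip().lower()
--     for k in reversed(properties):
--         if k.strip().lower() == key_updated:
--             value = properties[k].replace('+', '-') \
--                 .replace("\n", "").replace("\t", "").replace("\r", "")
--             return value, {k2: v2 for k2, v2 in properties.items() if k2 != k}
--     return None, properties.copy()
-- ===== Notes on version B (the rewrite author's own statement) =====
-- stated objective: simpler
-- what changed: Instead of A's two staged loops (build a normalized-key index dict, then scan its items and delete from a mutated copy), B scans the keys in REVERSE with an early return at the first normalized match (equivalent to A's last-wins) and rebuilds the remaining dict with a comprehension instead of copy+del.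
import Mathlib
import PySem

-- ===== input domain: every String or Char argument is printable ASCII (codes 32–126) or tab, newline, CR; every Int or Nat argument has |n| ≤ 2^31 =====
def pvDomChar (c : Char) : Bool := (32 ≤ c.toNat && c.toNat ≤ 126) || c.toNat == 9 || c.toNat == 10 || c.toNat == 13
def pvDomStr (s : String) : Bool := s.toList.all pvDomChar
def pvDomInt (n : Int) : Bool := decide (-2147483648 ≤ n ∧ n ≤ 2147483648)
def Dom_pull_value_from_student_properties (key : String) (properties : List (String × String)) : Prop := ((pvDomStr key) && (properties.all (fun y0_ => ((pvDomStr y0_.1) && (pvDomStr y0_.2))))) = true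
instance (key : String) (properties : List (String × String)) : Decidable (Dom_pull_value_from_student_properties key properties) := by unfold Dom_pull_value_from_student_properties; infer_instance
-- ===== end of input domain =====

-- B replaces A's two staged loops (normalized-key index dict, then a scan of its items with
-- copy+delete) by a reverse scan of the keys with early return at the first normalized match
-- (= A's last-wins) and a comprehension rebuilding the remaining dict (simpler; same cost).


-- k.strip().lower()
def pvNorm (s : String) : String := PySem.Str.lower (PySem.Str.strip s)

-- v.replace('+','-').replace('\n','').replace('\t','').replace('\r','')
def pvClean (v : String) : String :=
  PySem.Str.replace (PySem.Str.replace (PySem.Str.replace (PySem.Str.replace v "+" "-") "\n" "") "\t" "") "\r" ""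

-- ===== PORT A =====
-- The dict argument arrives as its association list; `PySem.Dict.ofList` rebuilds the dict.
-- `new_properties[tv]` is ported as `getD _ ""`: tv is always a present key there, so the
-- default is never used (Python would raise KeyError only on an absent key).
def pull_value_from_student_properties (key : String) (properties : List (String × String)) : Option String × (List (String × String)) :=
  let key_updated := pvNorm key
  let new_properties := PySem.Dict.ofList properties          -- properties.copy()
  let tmp_properties := new_properties.keys.foldl (fun t k => t.insert (pvNorm k) k) PySem.Dict.empty
  let res := tmp_properties.items.foldl
    (fun (st : Option String × PySem.Dict String String) tp =>
      if tp.1 == key_updated then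
        (some (pvClean (st.2.getD tp.2 "")), st.2.erase tp.2)
      else st)
    ((none : Option String), new_properties)
  (res.1, res.2.items)

-- ===== PORT B =====
-- `for k in reversed(properties): … return` is the first match of the reversed key list;
-- the dict comprehension is the filtered item list re-inserted into an empty dict.
def pull_value_from_student_properties_alt (key : String) (properties : List (String × String)) : Option String × (List (String × String)) :=
  let key_updated := pvNorm key
  let d := PySem.Dict.ofList properties
  match d.keys.reverse.find? (fun k => pvNorm k == key_updated) with
  | some k =>
      (some (pvClean (d.getD k "")),
       ((d.items.filter (fun r => !(r.1 == k))).foldl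
          (fun (t : PySem.Dict String String) p => t.insert p.1 p.2) PySem.Dict.empty).items)
  | none => (none, d.items)

-- ===== PRECONDITION & SPEC =====
def Spec_pull_value_from_student_properties (key : String) (properties : List (String × String)) (out : Option String × (List (String × String))) : Prop := out = pull_value_from_student_properties_alt key properties
instance (key : String) (properties : List (String × String)) (out : Option String × (List (String × String))) : Decidable (Spec_pull_value_from_student_properties key properties out) := by unfold Spec_pull_value_from_student_properties; infer_instance

-- ===== CLAIM (what is proved, stated in full; the proofs are below) =====
def Claim_equal_pull_value_from_student_properties : Prop := ∀ (key : String) (properties : List (String × String)), Dom_pull_value_from_student_properties key properties → Spec_pull_value_from_student_properties key properties (pull_value_from_student_properties key properties)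

-- ===== LEMMAS AND PROOFS =====

-- "keep the last match" fold = first match of the reversed list (or the initial accumulator)
theorem pv_foldl_last_eq_find_reverse {α : Type} (pred : α → Bool) (l : List α) (a : Option α) :
    l.foldl (fun acc x => if pred x then some x else acc) a
      = (l.reverse.find? pred).or a := by
  induction l generalizing a with
  | nil => simp
  | cons x xs ih =>
    simp only [List.foldl_cons, List.reverse_cons, List.find?_append]
    rw [ih]
    by_cases h : pred x
    · cases xs.reverse.find? pred <;> simp [h, Option.or]
    · cases xs.reverse.find? pred <;> simp [h, Option.or]

-- lookup after A's insert-loop = "keep the last match" fold over the keys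
theorem pv_get?_foldl_insert (q : String) (l : List String) (t : PySem.Dict String String) :
    (l.foldl (fun t k => t.insert (pvNorm k) k) t).get? q
      = l.foldl (fun acc k => if pvNorm k == q then some k else acc) (t.get? q) := by
  induction l generalizing t with
  | nil => rfl
  | cons x xs ih =>
    simp only [List.foldl_cons]
    rw [ih]
    have hstep : (t.insert (pvNorm x) x).get? q
        = if pvNorm x == q then some x else t.get? q := by
      rw [PySem.Dict.get?_insert]
      by_cases h : pvNorm x = q
      · simp [h]
      · simp [h, Ne.symm h]
    rw [hstep]

-- find? on a dict's items is the dict lookup paired with the query key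
theorem pv_find?_items (q : String) (l : List (String × String)) :
    l.find? (fun p => p.1 == q) = ((PySem.Dict.mk l).get? q).map (fun v => (q, v)) := by
  induction l with
  | nil => simp [PySem.Dict.get?]
  | cons p rest ih =>
    rw [PySem.Dict.get?_mk_cons]
    by_cases h : p.1 = q
    · rw [List.find?_cons_of_pos (by simp [h]), if_pos (by simp [h])]
      simp [← h]
    · rw [List.find?_cons_of_neg (by simp [h]), if_neg (by simp [h])]
      exact ih

-- a fold whose branch never fires is the identity
theorem pv_foldl_noop (q : String) (its : List (String × String))
    (st : Option String × PySem.Dict String String)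
    (h : ∀ r ∈ its, (r.1 == q) = false) :
    its.foldl
      (fun (st : Option String × PySem.Dict String String) tp =>
        if tp.1 == q then (some (pvClean (st.2.getD tp.2 "")), st.2.erase tp.2) else st)
      st = st := by
  induction its generalizing st with
  | nil => rfl
  | cons p rest ih =>
    rw [List.foldl_cons, if_neg (by simp [h p List.mem_cons_self])]
    exact ih st (fun r hr => h r (List.mem_cons_of_mem _ hr))

-- A's deletion loop over a nodup-keyed item list, characterised by find?
theorem pv_del_loop (q : String) (its : List (String × String)) (d : PySem.Dict String String)
    (hn : (its.map Prod.fst).Nodup) :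
    its.foldl
      (fun (st : Option String × PySem.Dict String String) tp =>
        if tp.1 == q then (some (pvClean (st.2.getD tp.2 "")), st.2.erase tp.2) else st)
      ((none : Option String), d)
      = match its.find? (fun p => p.1 == q) with
        | none => ((none : Option String), d)
        | some p => (some (pvClean (d.getD p.2 "")), d.erase p.2) := by
  induction its generalizing d with
  | nil => rfl
  | cons p rest ih =>
    simp only [List.map_cons, List.nodup_cons] at hn
    by_cases h : p.1 = q
    · have hrest : ∀ r ∈ rest, (r.1 == q) = false := by
        intro r hr
        have hne : r.1 ≠ p.1 := fun he => hn.1 (he ▸ List.mem_map_of_mem hr)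
        simp [h ▸ hne]
      rw [List.foldl_cons, if_pos (by simp [h]), List.find?_cons_of_pos (by simp [h]),
        pv_foldl_noop q rest _ hrest]
    · rw [List.foldl_cons, if_neg (by simp [h]), List.find?_cons_of_neg (by simp [h])]
      exact ih d hn.2

-- B's comprehension rebuild over distinct fresh keys returns the filtered list itself
theorem pv_rebuild (l : List (String × String)) (hn : (l.map Prod.fst).Nodup) :
    (l.foldl (fun (t : PySem.Dict String String) p => t.insert p.1 p.2)
      PySem.Dict.empty).items = l := by
  have h := PySem.Dict.items_foldl_insert_fresh (l := l) (k := Prod.fst) (v := Prod.snd)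
    (d := PySem.Dict.empty) (by intro a _; rfl) hn
  simpa using h

-- ===== VERDICT (by name: the statement is the Claim_ definition above) =====
theorem pull_value_from_student_properties_spec : Claim_equal_pull_value_from_student_properties := by
  intro key properties _
  unfold Spec_pull_value_from_student_properties
  unfold pull_value_from_student_properties pull_value_from_student_properties_alt
  set q := pvNorm key with hq
  set d := PySem.Dict.ofList properties with hd
  have hnd : d.keys.Nodup := PySem.Dict.nodup_keys_ofList properties
  have htmpnd : (d.keys.foldl (fun t k => t.insert (pvNorm k) k) PySem.Dict.empty).keys.Nodup :=
    PySem.Dict.nodup_keys_foldl_insert_key d.keys pvNorm (fun _ k => k) PySem.Dict.empty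
      PySem.Dict.nodup_keys_empty
  set tmp := d.keys.foldl (fun t k => t.insert (pvNorm k) k) PySem.Dict.empty with htmp
  -- the last matching key of d.keys
  set lastK := d.keys.foldl
      (fun (acc : Option String) k => if pvNorm k == q then some k else acc) none
    with hlastK
  -- tmp.get? q = lastK
  have hget : tmp.get? q = lastK := by
    rw [htmp, pv_get?_foldl_insert q d.keys PySem.Dict.empty, PySem.Dict.get?_empty, hlastK]
  -- B's reverse-find = lastK
  have hfindB : d.keys.reverse.find? (fun k => pvNorm k == q) = lastK := by
    rw [hlastK, pv_foldl_last_eq_find_reverse (fun k => pvNorm k == q) d.keys none]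
    cases d.keys.reverse.find? (fun k => pvNorm k == q) <;> rfl
  -- A's second loop via find? and the bridge
  have hfind : tmp.items.find? (fun p => p.1 == q) = (tmp.get? q).map (fun v => (q, v)) :=
    pv_find?_items q tmp.items
  have hdel := pv_del_loop q tmp.items d htmpnd
  simp only []
  rw [hdel, hfind, hget, hfindB]
  cases hcase : lastK with
  | none => simp
  | some k0 =>
    have hrebuild : ((d.items.filter (fun r => !(r.1 == k0))).foldl
        (fun (t : PySem.Dict String String) p => t.insert p.1 p.2) PySem.Dict.empty).items
        = (d.erase k0).items := by
      apply pv_rebuild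
      have : (d.items.filter (fun r => !(r.1 == k0))).Sublist d.items := List.filter_sublist
      exact (this.map Prod.fst).nodup hnd
    simp [PySem.Dict.erase] at hrebuild ⊢
    rw [hrebuild]
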